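-- pv_equiv track=rewrite | github.com/rkdms0116/programmers | 연습문제/숫자_카드_나누기.py | solution
-- ===== SOURCE A (Python) =====
-- def solution(arrayA, arrayB):
--     # arrayA의 최대공약수 구하기
--     if len(arrayA) == 1:
--         gcdA = arrayA[0]
--     else:
--         gcdA = find_gcd(arrayA)
--
--     # arrayB의 최대공약수 구하기
--     if len(arrayB) == 1:
--         gcdB = arrayB[0]
--     else:
--         gcdB = find_gcd(arrayB)
--
--     # 두 배열의 최대 공약수 list를 내림차순으로 정렬하기
--     find_li = sorted([gcdA, gcdB], reverse=True)
--
--     # 최대공약수의 값이 어떤 배열의 최대공약수인지 확인 후 > 해당 배열의 최대공약수는 모든 숫자를 나눌 수 있음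
--     # 나눌 수 없는 배열을 확인하여 array로 지정
--     for fi in find_li:
--         if gcdA%fi == 0:
--             array = arrayB
--         elif gcdB%fi == 0:
--             array = arrayA
--         else:
--             break
--         # array를 돌아보면서 하나도 나눌 수 없는 정수임을 check
--         for arr in array:
--             if arr%fi == 0:
--                 break
--         else:
--              return fi
--     else:
--         return 0
--
-- def find_gcd(array):
--     gcd = array[0]
--
--     for i in range(1, len(array)):
--
--         if gcd == 1:
--             return gcd
--
--         a, b = max(gcd, array[i]), min(gcd, array[i])
--         while True:
--             q, r = divmod(a, b)
--             if r == 0: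
--                 gcd = b
--                 break
--             else:
--                 a, b = b, r
--     return gcd
-- ===== SOURCE B (Python) =====
-- def solution(arrayA, arrayB):
--     gcdA = gcd_list(arrayA)
--     gcdB = gcd_list(arrayB)
--     validA = all(b % gcdA for b in arrayB)
--     validB = all(a % gcdB for a in arrayA)
--     cands = [g for g, ok in ((gcdA, validA), (gcdB, validB)) if ok]
--     return max(cands, default=0)
--
--
-- def gcd_list(array):
--     g = array[0]
--     for x in array[1:]:
--         if g == 1:
--             return 1
--         g = euclid(max(g, x), min(g, x))
--     return g
--
--
-- def euclid(a, b):
--     r = a % b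
--     return b if r == 0 else euclid(b, r)
-- ===== Notes on version B (the rewrite author's own statement) =====
-- stated objective: simpler
-- what changed: A's descending candidate loop (sorted pair, array-selecting if/elif with a dead break, nested for/else) is replaced by computing the two gcds once and two independent divisibility flags, returning max of the valid gcds with default 0; the index-driven while/divmod Euclid is replaced by a recursive euclid and a fold over the tail.
import Mathlib
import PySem

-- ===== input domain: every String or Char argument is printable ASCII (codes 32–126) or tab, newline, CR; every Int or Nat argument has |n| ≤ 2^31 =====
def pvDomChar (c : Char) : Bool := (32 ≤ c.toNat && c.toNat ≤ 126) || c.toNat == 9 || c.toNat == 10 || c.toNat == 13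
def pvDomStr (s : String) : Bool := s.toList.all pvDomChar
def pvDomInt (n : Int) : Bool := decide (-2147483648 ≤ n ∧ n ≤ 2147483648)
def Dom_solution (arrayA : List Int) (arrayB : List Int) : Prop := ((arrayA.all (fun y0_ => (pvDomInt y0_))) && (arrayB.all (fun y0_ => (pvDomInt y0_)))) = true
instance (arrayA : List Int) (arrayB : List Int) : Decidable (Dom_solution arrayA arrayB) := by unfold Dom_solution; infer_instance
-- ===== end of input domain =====

-- B replaces A's descending candidate loop (array-selecting branch, for/else, dead break)
-- by two independent divisibility flags and a max-with-default; objective: simpler.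

-- ===== PORT A =====

-- |a % b| < |b| for b ≠ 0 (cited by the termination proofs of the Euclid loops)
lemma pv_mod_natAbs_lt (a b : Int) (h : b ≠ 0) : (PySem.Int.mod a b).natAbs < b.natAbs := by
  rcases lt_or_gt_of_ne h with hb | hb
  · have := PySem.Int.mod_neg_bounds a hb; omega
  · have h1 := PySem.Int.mod_nonneg a hb; have h2 := PySem.Int.mod_lt a hb; omega

-- the 'while True: q, r = divmod(a, b); …' loop of find_gcd; none = ZeroDivisionError
def euclidA (a b : Int) : Option Int :=
  match h : PySem.Int.divmod? a b with
  | none => none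
  | some (_q, r) => if _hr : r = 0 then some b else euclidA b r
termination_by b.natAbs
decreasing_by
  have hb : b ≠ 0 := by intro hb0; simp [PySem.Int.divmod?, hb0] at h
  have hrm : r = PySem.Int.mod a b := by
    simp [PySem.Int.divmod?, hb] at h; exact h.2.symm
  subst hrm; exact pv_mod_natAbs_lt a b hb

-- 'for i in range(1, len(array)):' body of find_gcd; none = ZeroDivisionError
def findGcdLoop (array : List Int) (g : Int) (i : Nat) : Option Int :=
  if _hi : i < array.length then
    if g = 1 then some g
    else
      match PySem.List.pyGet? array (i : Int) with
      | none => none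
      | some ai =>
        match euclidA (max g ai) (min g ai) with
        | none => none
        | some g' => findGcdLoop array g' (i + 1)
  else some g
termination_by array.length - i
decreasing_by omega

def find_gcd (array : List Int) : Option Int :=
  match PySem.List.pyGet? array 0 with
  | none => none                                 -- IndexError on []
  | some g0 => findGcdLoop array g0 1

-- the outer 'for fi in find_li: … else: return 0' loop of solution;
-- none = ZeroDivisionError (fi = 0) or the dead 'break' (Python would return None)
def outerLoopA (gA gB : Int) (arrayA arrayB : List Int) : List Int → Option Int
  | [] => some 0
  | fi :: rest =>
    match PySem.Int.mod? gA fi with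
    | none => none
    | some r1 =>
      if r1 = 0 then
        if arrayB.any (fun x => PySem.Int.mod x fi == 0) then outerLoopA gA gB arrayA arrayB rest
        else some fi
      else
        match PySem.Int.mod? gB fi with
        | none => none
        | some r2 =>
          if r2 = 0 then
            if arrayA.any (fun x => PySem.Int.mod x fi == 0) then outerLoopA gA gB arrayA arrayB rest
            else some fi
          else none

def solution (arrayA : List Int) (arrayB : List Int) : Int :=
  let gA? := if arrayA.length = 1 then PySem.List.pyGet? arrayA 0 else find_gcd arrayA
  let gB? := if arrayB.length = 1 then PySem.List.pyGet? arrayB 0 else find_gcd arrayB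
  match gA?, gB? with
  | some gA, some gB =>
    let find_li := PySem.List.sorted [gA, gB] (fun x => x) true
    (outerLoopA gA gB arrayA arrayB find_li).getD 0  -- getD's default is dead: none is excluded by Pre_
  | _, _ => 0                                        -- exception in Python; excluded by Pre_

-- ===== PORT B =====

-- Source B's euclid (recursive); the b = 0 guard only totalises the ZeroDivisionError case
def euclidB (a b : Int) : Int :=
  if _hb : b = 0 then 0
  else if PySem.Int.mod a b = 0 then b else euclidB b (PySem.Int.mod a b)
termination_by b.natAbs
decreasing_by exact pv_mod_natAbs_lt a b _hb

-- Source B's gcd_list: fold over array[1:] with the early stop at 1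
def gcdListB (g : Int) : List Int → Int
  | [] => g
  | x :: xs => if g = 1 then 1 else gcdListB (euclidB (max g x) (min g x)) xs

def solution_alt (arrayA : List Int) (arrayB : List Int) : Int :=
  match arrayA, arrayB with
  | a0 :: as_, b0 :: bs =>
    let gA := gcdListB a0 as_
    let gB := gcdListB b0 bs
    let validA := (b0 :: bs).all (fun x => !(PySem.Int.mod x gA == 0))
    let validB := (a0 :: as_).all (fun x => !(PySem.Int.mod x gB == 0))
    let cands := (if validA then [gA] else []) ++ (if validB then [gB] else [])
    PySem.List.maxD cands (fun x => x) 0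
  | _, _ => 0                                        -- IndexError in Python; excluded by Pre_

-- ===== PRECONDITION & SPEC =====

-- A raises ZeroDivisionError exactly when a 0 is met while its running gcd state is
-- non-negative: i.e. some arr[j] = 0 follows an all-positive prefix whose gcd is not 1
-- (the gcd-1 early return skips the rest), or the list starts 0, x with x ≥ 0; the list
-- [0] makes the outer modulus zero.  B raises on exactly the same inputs, and [] is an
-- IndexError for both.  NoCrash is the complement of that closed-form crash condition.
abbrev NoCrash (arr : List Int) : Prop :=
  arr ≠ [] ∧
  (arr.getD 0 0 = 0 → 1 < arr.length ∧ arr.getD 1 0 < 0) ∧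
  (arr.getD 0 0 ≠ 0 → ∀ j, j < arr.length → arr.getD j 0 = 0 →
     ¬((∀ k, k < j → 0 < arr.getD k 0) ∧
       (arr.take j).foldl (fun n y => Nat.gcd n y.natAbs) 0 ≠ 1))

def Pre_solution (arrayA : List Int) (arrayB : List Int) : Prop :=
  NoCrash arrayA ∧ NoCrash arrayB

instance (arrayA : List Int) (arrayB : List Int) : Decidable (Pre_solution arrayA arrayB) := by
  unfold Pre_solution
  have h1 : Decidable (NoCrash arrayA) := by infer_instance
  have h2 : Decidable (NoCrash arrayB) := by infer_instance
  exact @instDecidableAnd _ _ h1 h2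

def pvWitness_solution : List Int × List Int := ([6, 4], [3])

def Spec_solution (arrayA : List Int) (arrayB : List Int) (out : Int) : Prop := out = solution_alt arrayA arrayB
instance (arrayA : List Int) (arrayB : List Int) (out : Int) : Decidable (Spec_solution arrayA arrayB out) := by unfold Spec_solution; infer_instance

-- ===== CLAIM (what is proved, stated in full; the proofs are below) =====
def Claim_equal_solution : Prop := ∀ (arrayA : List Int) (arrayB : List Int), Dom_solution arrayA arrayB → Pre_solution arrayA arrayB → Spec_solution arrayA arrayB (solution arrayA arrayB)

-- ===== LEMMAS AND PROOFS =====

-- joint characterisation of the two Euclid loops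
lemma euclid_spec : ∀ (n : Nat) (a b : Int), b.natAbs ≤ n → b ≠ 0 →
    euclidA a b = some (euclidB a b) ∧ (euclidB a b).natAbs = Int.gcd a b ∧
    (0 < euclidB a b ↔ 0 < b) ∧ euclidB a b ∣ a ∧ euclidB a b ∣ b := by
  intro n
  induction n with
  | zero => intro a b hle hb; exfalso; omega
  | succ n ih =>
    intro a b hle hb
    have hdm : PySem.Int.divmod? a b = some (PySem.Int.floordiv a b, PySem.Int.mod a b) := by
      simp [PySem.Int.divmod?, PySem.Int.floordiv, PySem.Int.mod, hb]
    by_cases hr : PySem.Int.mod a b = 0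
    · have hBA : euclidB a b = b := by rw [euclidB]; simp [hb, hr]
      have hA : euclidA a b = some b := by rw [euclidA, hdm]; simp [hr]
      have hdvd : b ∣ a := (PySem.Int.mod_eq_zero_iff_dvd a b).mp hr
      refine ⟨by rw [hA, hBA], ?_, by rw [hBA], by rw [hBA]; exact hdvd, by rw [hBA]⟩
      rw [hBA]; exact (Int.gcd_eq_natAbs_right_iff_dvd.mpr hdvd).symm
    · set r := PySem.Int.mod a b with hrdef
      have hlt : r.natAbs < b.natAbs := pv_mod_natAbs_lt a b hb
      have hih := ih b r (by omega) hr
      have hBA : euclidB a b = euclidB b r := by rw [euclidB]; simp only [← hrdef]; rw [dif_neg hb, if_neg hr]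
      have hA : euclidA a b = euclidA b r := by rw [euclidA, hdm]; simp only [← hrdef]; rw [dif_neg hr]
      obtain ⟨ih1, ih2, ih3, ih4, ih5⟩ := hih
      have hq : PySem.Int.floordiv a b * b + r = a := PySem.Int.floordiv_mul_add_mod a b
      refine ⟨by rw [hA, hBA, ih1], ?_, ?_, ?_, ?_⟩
      · rw [hBA, ih2]
        have : r = a - PySem.Int.floordiv a b * b := by omega
        rw [this, Int.gcd_sub_mul_right_right b a _]
        exact Int.gcd_comm b a
      · rw [hBA]
        constructor
        · intro h; have := ih3.mp h
          rcases lt_or_gt_of_ne hb with hbneg | hbpos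
          · have := (PySem.Int.mod_neg_bounds a hbneg).2; omega
          · exact hbpos
        · intro hbpos
          have h1 := PySem.Int.mod_nonneg a hbpos
          exact ih3.mpr (by omega)
      · rw [hBA]
        have : a = PySem.Int.floordiv a b * b + r := hq.symm
        rw [this]
        exact Dvd.dvd.add (Dvd.dvd.mul_left ih4 _) ih5
      · rw [hBA]; exact ih4

-- proof-only reshaping of findGcdLoop as a fold over the remaining list
def listLoopA (g : Int) : List Int → Option Int
  | [] => some g
  | x :: xs =>
    if g = 1 then some g
    else
      match euclidA (max g x) (min g x) with
      | none => none
      | some g' => listLoopA g' xs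


lemma findGcdLoop_eq (array : List Int) : ∀ (k i : Nat) (g : Int), array.length - i ≤ k →
    findGcdLoop array g i = listLoopA g (array.drop i) := by
  intro k
  induction k with
  | zero =>
    intro i g hk
    have hge : array.length ≤ i := by omega
    rw [findGcdLoop, dif_neg (by omega), List.drop_eq_nil_of_le hge, listLoopA]
  | succ k ih =>
    intro i g hk
    by_cases hi : i < array.length
    · rw [findGcdLoop, dif_pos hi, List.drop_eq_getElem_cons hi, listLoopA]
      rw [PySem.List.pyGet?_ofNat array i hi]
      by_cases hg1 : g = 1
      · simp [hg1]
      · simp only [if_neg hg1]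
        cases he : euclidA (max g array[i]) (min g array[i]) with
        | none => rfl
        | some g' => exact ih (i+1) g' (by omega)
    · rw [findGcdLoop, dif_neg hi, List.drop_eq_nil_of_le (by omega), listLoopA]

def SafeG (g : Int) (xs : List Int) : Prop :=
  ∀ j, j < xs.length → xs.getD j 0 = 0 →
    ¬(0 < g ∧ (∀ k, k < j → 0 < xs.getD k 0) ∧
      (xs.take j).foldl (fun n y => Nat.gcd n y.natAbs) g.natAbs ≠ 1)

lemma listLoop_spec : ∀ (xs : List Int) (g : Int), g ≠ 0 → SafeG g xs →
    listLoopA g xs = some (gcdListB g xs) ∧ gcdListB g xs ≠ 0 ∧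
    gcdListB g xs ∣ g ∧ ∀ x ∈ xs, gcdListB g xs ∣ x := by
  intro xs
  induction xs with
  | nil => intro g hg _; exact ⟨rfl, hg, dvd_refl g, by simp⟩
  | cons x xs ih =>
    intro g hg hsafe
    by_cases hg1 : g = 1
    · subst hg1
      refine ⟨by rw [listLoopA, gcdListB]; simp, by rw [gcdListB]; simp, by rw [gcdListB]; simp, ?_⟩
      rw [gcdListB]; simp
    · -- min g x ≠ 0
      have hmin : min g x ≠ 0 := by
        intro h0
        have hx0 : x = 0 ∧ 0 < g := by
          rcases le_total g x with h | h
          · rw [min_eq_left h] at h0; exact absurd h0 hg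
          · rw [min_eq_right h] at h0; subst h0; omega
        obtain ⟨hx0, hgpos⟩ := hx0
        exact hsafe 0 (by simp) (by simp [hx0])
          ⟨hgpos, by omega, by simp; omega⟩
      obtain ⟨he1, he2, he3, he4, he5⟩ :=
        euclid_spec (min g x).natAbs (max g x) (min g x) le_rfl hmin
      set g' := euclidB (max g x) (min g x) with hg'def
      have hg'ne : g' ≠ 0 := by
        intro h0
        rw [h0] at he2
        have : Int.gcd (max g x) (min g x) ≠ 0 := by
          intro hgz
          obtain ⟨h1, h2⟩ := Int.gcd_eq_zero_iff.mp hgz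
          rcases le_total g x with h | h
          · rw [max_eq_right h] at h1; rw [min_eq_left h] at h2; exact hg h2
          · rw [max_eq_left h] at h1; exact hg h1
        omega
      have hg'g : g' ∣ g ∧ g' ∣ x := by
        rcases le_total g x with h | h
        · rw [max_eq_right h] at he4; rw [min_eq_left h] at he5; exact ⟨he5, he4⟩
        · rw [max_eq_left h] at he4; rw [min_eq_right h] at he5; exact ⟨he4, he5⟩
      have hg'abs : g'.natAbs = Nat.gcd g.natAbs x.natAbs := by
        rw [he2]
        rcases le_total g x with h | h
        · rw [max_eq_right h, min_eq_left h]; exact Nat.gcd_comm _ _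
        · rw [max_eq_left h, min_eq_right h]; rfl
      have hg'pos : 0 < g' ↔ (0 < g ∧ 0 < x) := by rw [he3, lt_min_iff]
      have hsafe' : SafeG g' xs := by
        intro j hj hj0 ⟨hp, hall, hfold⟩
        have hgx : 0 < g ∧ 0 < x := hg'pos.mp hp
        refine hsafe (j+1) (by simpa using hj) (by simpa using hj0) ⟨hgx.1, ?_, ?_⟩
        · intro k hk
          cases k with
          | zero => simpa using hgx.2
          | succ k => simpa using hall k (by omega)
        · simpa [List.foldl, hg'abs] using hfold
      obtain ⟨ih1, ih2, ih3, ih4⟩ := ih g' hg'ne hsafe'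
      have hBval : gcdListB g (x :: xs) = gcdListB g' xs := by rw [gcdListB, if_neg hg1]
      refine ⟨?_, by rw [hBval]; exact ih2, by rw [hBval]; exact ih3.trans hg'g.1, ?_⟩
      · rw [listLoopA, if_neg hg1, he1]
        show listLoopA g' xs = some (gcdListB g (x :: xs))
        rw [ih1, hBval]
      · intro y hy
        rw [hBval]
        rcases List.mem_cons.mp hy with h | h
        · subst h; exact ih3.trans hg'g.2
        · exact ih4 y h

-- the gcd phase, assembled: what A's (len==1 ? array[0] : find_gcd) returns on a NoCrash list
lemma gcd_phase (a0 : Int) (rest : List Int) (h : NoCrash (a0 :: rest)) :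
    (if (a0 :: rest).length = 1 then PySem.List.pyGet? (a0 :: rest) 0 else find_gcd (a0 :: rest))
      = some (gcdListB a0 rest) ∧
    gcdListB a0 rest ≠ 0 ∧ ∀ x ∈ a0 :: rest, gcdListB a0 rest ∣ x := by
  obtain ⟨-, hzero, hpos⟩ := h
  cases rest with
  | nil =>
    have ha0 : a0 ≠ 0 := by
      intro h0; obtain ⟨hlt, -⟩ := hzero (by simpa using h0); simp at hlt
    refine ⟨by simp [PySem.List.pyGet?, PySem.List.pyIdx?, gcdListB], by simpa [gcdListB] using ha0, ?_⟩
    intro y hy; rw [List.mem_singleton] at hy; rw [hy]; exact dvd_refl a0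
  | cons x t =>
    have hlen : (a0 :: x :: t).length ≠ 1 := by simp
    have hget0 : PySem.List.pyGet? (a0 :: x :: t) 0 = some a0 := by
      have := PySem.List.pyGet?_ofNat (a0 :: x :: t) 0 (by simp)
      exact this
    have hloop : findGcdLoop (a0 :: x :: t) a0 1 = listLoopA a0 (x :: t) := by
      have := findGcdLoop_eq (a0 :: x :: t) (a0 :: x :: t).length 1 a0 (by omega)
      simpa using this
    have hfg : find_gcd (a0 :: x :: t) = listLoopA a0 (x :: t) := by
      rw [find_gcd, hget0]; exact hloop
    rw [if_neg hlen, hfg]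
    by_cases ha0 : a0 = 0
    · subst ha0
      obtain ⟨-, hx0⟩ := hzero (by simp)
      have hxneg : x < 0 := by simpa using hx0
      have hxne : x ≠ 0 := by omega
      have hmx : max (0:Int) x = 0 := by omega
      have hmn : min (0:Int) x = x := by omega
      obtain ⟨he1, he2, he3, he4, he5⟩ := euclid_spec x.natAbs (max 0 x) (min 0 x) (by rw [hmn]) (by rw [hmn]; exact hxne)
      set g' := euclidB (max 0 x) (min 0 x) with hg'def
      have hg'ne : g' ≠ 0 := by
        intro h0; rw [h0] at he2
        rw [hmx, hmn] at he2
        simp [Int.gcd] at he2; omega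
      have hg'neg : ¬ 0 < g' := by rw [he3, hmn]; omega
      have hsafe' : SafeG g' t := by intro j hj hj0 ⟨hp, h2, h3⟩; exact hg'neg hp
      obtain ⟨ih1, ih2, ih3, ih4⟩ := listLoop_spec t g' hg'ne hsafe'
      have hB : gcdListB 0 (x :: t) = gcdListB g' t := by rw [gcdListB, if_neg (by norm_num), ← hg'def]
      refine ⟨?_, by rw [hB]; exact ih2, ?_⟩
      · rw [listLoopA, if_neg (by norm_num), he1]
        show listLoopA g' t = some (gcdListB 0 (x :: t))
        rw [ih1, hB]
      · intro y hy
        rw [hB]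
        rcases List.mem_cons.mp hy with h | h
        · subst h; exact Dvd.dvd.trans ih3 (dvd_zero g')
        rcases List.mem_cons.mp h with h' | h'
        · subst h'; exact Dvd.dvd.trans ih3 (by rw [hmn] at he5; exact he5)
        · exact ih4 y h'
    · have hsafe : SafeG a0 (x :: t) := by
        intro j hj hj0 ⟨hp, hall, hfold⟩
        refine hpos (by simpa using ha0) (j+1) (by simpa using hj) (by simpa using hj0) ⟨?_, ?_⟩
        · intro k hk
          cases k with
          | zero => simpa using hp
          | succ k => simpa using hall k (by omega)
        · have : ((a0 :: x :: t).take (j+1)).foldl (fun n y => Nat.gcd n y.natAbs) 0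
              = ((x :: t).take j).foldl (fun n y => Nat.gcd n y.natAbs) a0.natAbs := by
            simp
          rw [this]; exact hfold
      obtain ⟨ih1, ih2, ih3, ih4⟩ := listLoop_spec (x :: t) a0 ha0 hsafe
      refine ⟨ih1, ih2, ?_⟩
      intro y hy
      rcases List.mem_cons.mp hy with h | h
      · subst h; exact ih3
      · exact ih4 y h
lemma pv_mod?_some (a fi : Int) (h : fi ≠ 0) : PySem.Int.mod? a fi = some (PySem.Int.mod a fi) := by
  simp [PySem.Int.mod?, PySem.Int.mod, h]

lemma pv_maxD_one (a : Int) : PySem.List.maxD [a] (fun x => x) 0 = a := by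
  simp [PySem.List.maxD, PySem.List.max?]
lemma pv_maxD_two (a b : Int) : PySem.List.maxD [a, b] (fun x => x) 0 = if a < b then b else a := by
  simp [PySem.List.maxD, PySem.List.max?]; split <;> rfl

lemma pv_all_not_any (l : List Int) (g : Int) :
    l.all (fun x => !(PySem.Int.mod x g == 0)) = !(l.any fun x => PySem.Int.mod x g == 0) := by
  induction l with
  | nil => rfl
  | cons x xs ih => simp [List.all_cons, List.any_cons, ih]

lemma outerLoopA_cons (gA gB : Int) (arrayA arrayB : List Int) (fi : Int) (rest : List Int)
    (h : fi ≠ 0) :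
    outerLoopA gA gB arrayA arrayB (fi :: rest) =
      (if PySem.Int.mod gA fi = 0 then
        (if arrayB.any (fun x => PySem.Int.mod x fi == 0) then outerLoopA gA gB arrayA arrayB rest
         else some fi)
      else if PySem.Int.mod gB fi = 0 then
        (if arrayA.any (fun x => PySem.Int.mod x fi == 0) then outerLoopA gA gB arrayA arrayB rest
         else some fi)
      else none) := by
  rw [outerLoopA]
  simp only [pv_mod?_some _ _ h]

lemma outer_phase (gA gB : Int) (a0 b0 : Int) (as_ bs : List Int)
    (hgA : gA ≠ 0) (hgB : gB ≠ 0)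
    (hdA : ∀ x ∈ a0 :: as_, gA ∣ x) (hdB : ∀ x ∈ b0 :: bs, gB ∣ x) :
    outerLoopA gA gB (a0 :: as_) (b0 :: bs) (PySem.List.sorted [gA, gB] (fun x => x) true)
      = some (PySem.List.maxD
          ((if (b0 :: bs).all (fun x => !(PySem.Int.mod x gA == 0)) then [gA] else []) ++
           (if (a0 :: as_).all (fun x => !(PySem.Int.mod x gB == 0)) then [gB] else []))
          (fun x => x) 0) := by
  have hselfA : PySem.Int.mod gA gA = 0 := (PySem.Int.mod_eq_zero_iff_dvd gA gA).mpr dvd_rfl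
  have hselfB : PySem.Int.mod gB gB = 0 := (PySem.Int.mod_eq_zero_iff_dvd gB gB).mpr dvd_rfl
  -- arrayB is entirely divisible by gB, arrayA by gA
  have hBfull : ((b0 :: bs).any fun x => PySem.Int.mod x gB == 0) = true := by
    simp only [List.any_cons, Bool.or_eq_true, beq_iff_eq]
    exact Or.inl ((PySem.Int.mod_eq_zero_iff_dvd b0 gB).mpr (hdB b0 (by simp)))
  have hAfull : ((a0 :: as_).any fun x => PySem.Int.mod x gA == 0) = true := by
    simp only [List.any_cons, Bool.or_eq_true, beq_iff_eq]
    exact Or.inl ((PySem.Int.mod_eq_zero_iff_dvd a0 gA).mpr (hdA a0 (by simp)))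
  rw [pv_all_not_any, pv_all_not_any]
  rcases lt_or_ge gA gB with hlt | hge
  · -- sorted desc = [gB, gA]
    have hsort : PySem.List.sorted [gA, gB] (fun x => x) true = [gB, gA] :=
      PySem.List.sorted_rev_eq_of_perm_of_pairwise_gt _ _ _
        (List.Perm.swap _ _ _) (by simp [hlt])
    rw [hsort]
    by_cases hd : gB ∣ gA
    · -- second candidate gB also divides gA: both checks scan fully-divisible lists
      have hsBgB : ((a0 :: as_).any fun x => PySem.Int.mod x gB == 0) = true := by
        simp only [List.any_cons, Bool.or_eq_true, beq_iff_eq]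
        exact Or.inl ((PySem.Int.mod_eq_zero_iff_dvd a0 gB).mpr (hd.trans (hdA a0 (by simp))))
      rw [outerLoopA_cons gA gB _ _ gB _ hgB,
        if_pos ((PySem.Int.mod_eq_zero_iff_dvd gA gB).mpr hd), if_pos hBfull,
        outerLoopA_cons gA gB _ _ gA _ hgA, if_pos hselfA]
      rw [hsBgB]
      simp only [Bool.not_true, Bool.false_eq_true, if_false, List.append_nil]
      cases hsA : ((b0 :: bs).any fun x => PySem.Int.mod x gA == 0) with
      | true => rw [if_pos rfl, outerLoopA]; simp
      | false => simp [pv_maxD_one]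
    · have hr1 : PySem.Int.mod gA gB ≠ 0 := fun h => hd ((PySem.Int.mod_eq_zero_iff_dvd gA gB).mp h)
      rw [outerLoopA_cons gA gB _ _ gB _ hgB, if_neg hr1, if_pos hselfB]
      cases hsB : ((a0 :: as_).any fun x => PySem.Int.mod x gB == 0) with
      | true =>
        rw [if_pos rfl, outerLoopA_cons gA gB _ _ gA _ hgA, if_pos hselfA]
        simp only [Bool.not_true, Bool.false_eq_true, if_false, List.append_nil]
        cases hsA : ((b0 :: bs).any fun x => PySem.Int.mod x gA == 0) with
        | true => rw [if_pos rfl, outerLoopA]; simp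
        | false => simp [pv_maxD_one]
      | false =>
        simp only [Bool.not_false, if_true]
        cases hsA : ((b0 :: bs).any fun x => PySem.Int.mod x gA == 0) with
        | true => simp [pv_maxD_one]
        | false => simp [pv_maxD_two, hlt]
  · -- sorted desc = [gA, gB]
    have hsort : PySem.List.sorted [gA, gB] (fun x => x) true = [gA, gB] :=
      PySem.List.sorted_rev_eq_self_of_pairwise _ _ (by simp [hge])
    rw [hsort, outerLoopA_cons gA gB _ _ gA _ hgA, if_pos hselfA]
    cases hsA : ((b0 :: bs).any fun x => PySem.Int.mod x gA == 0) with
    | false =>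
      simp only [Bool.not_false, if_true]
      cases hsB : ((a0 :: as_).any fun x => PySem.Int.mod x gB == 0) with
      | true => simp [pv_maxD_one]
      | false => simp [pv_maxD_two, not_lt.mpr hge]
    | true =>
      rw [if_pos rfl, outerLoopA_cons gA gB _ _ gB _ hgB]
      simp only [Bool.not_true, Bool.false_eq_true, if_false, List.nil_append]
      by_cases hd : gB ∣ gA
      · have hsBgB : ((a0 :: as_).any fun x => PySem.Int.mod x gB == 0) = true := by
          simp only [List.any_cons, Bool.or_eq_true, beq_iff_eq]
          exact Or.inl ((PySem.Int.mod_eq_zero_iff_dvd a0 gB).mpr (hd.trans (hdA a0 (by simp))))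
        rw [if_pos ((PySem.Int.mod_eq_zero_iff_dvd gA gB).mpr hd), if_pos hBfull, outerLoopA]
        rw [hsBgB]; simp
      · have hr1 : PySem.Int.mod gA gB ≠ 0 := fun h => hd ((PySem.Int.mod_eq_zero_iff_dvd gA gB).mp h)
        rw [if_neg hr1, if_pos hselfB]
        cases hsB : ((a0 :: as_).any fun x => PySem.Int.mod x gB == 0) with
        | true => rw [if_pos rfl, outerLoopA]; simp
        | false => simp [pv_maxD_one]

-- ===== VERDICT (by name: the statement is the Claim_ definition above) =====
theorem solution_spec : Claim_equal_solution := by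
  intro arrayA arrayB hdom hpre
  obtain ⟨hncA, hncB⟩ := hpre
  cases arrayA with
  | nil => exact absurd rfl hncA.1
  | cons a0 as_ =>
    cases arrayB with
    | nil => exact absurd rfl hncB.1
    | cons b0 bs =>
      obtain ⟨hga1, hga2, hga3⟩ := gcd_phase a0 as_ hncA
      obtain ⟨hgb1, hgb2, hgb3⟩ := gcd_phase b0 bs hncB
      show solution (a0 :: as_) (b0 :: bs) = solution_alt (a0 :: as_) (b0 :: bs)
      simp only [solution, solution_alt, hga1, hgb1]
      rw [outer_phase (gcdListB a0 as_) (gcdListB b0 bs) a0 b0 as_ bs hga2 hgb2 hga3 hgb3]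
      rfl
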